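-- pv_equiv track=rewrite | github.com/christopherLang/baruch_college_sta9794_projects | lib/chunkers.py | simple_idchunker
-- ===== SOURCE A (Python) =====
-- def simple_idchunker(iterable, chunk_size=1000):
--     """Evenly chunked indices with generator
--
--     Creates a generator that returns index values mapped to iterable. Each call
--     returns a list of unique index values of chunk size or less
--
--     The generator is effectively an enumerator, just returns index values in
--     chunk size (or less) instead of one at a time
--
--     Args:
--         iterable (iterable):
--             An object that is iterable, such as iterators, generators, etc.
--
--         chunk_size (int):
--             The size of each returned collection
--
--     Returns (list(int)):
--         The generator returns a list of index values of chunk size or less.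
--         Each call returns the next set of unique index values
--     """
--     current_index = 0
--     result_indices = list()
--
--     for _ in iterable:
--         result_indices.append(current_index)
--         current_index += 1
--
--         if len(result_indices) == chunk_size:
--             yield result_indices
--
--             result_indices = list()
--
--     if len(result_indices) != 0:
--         yield result_indices
-- ===== SOURCE B (Python) =====
-- def simple_idchunker(iterable, chunk_size=1000):
--     n = sum(1 for _ in iterable)
--     start = 0
--     while start < n:
--         end = min(start + chunk_size, n)
--         yield list(range(start, end))
--         start = end
-- ===== Notes on version B (the rewrite author's own statement) =====
-- stated objective: alternative
-- what changed: B counts the iterable once and then emits each chunk as an arithmetic index block with a start/end cursor, instead of A's element-by-element accumulator that appends indices and flushes when the buffer fills; Pre_ excludes nonpositive chunk_size with a nonempty iterable, where A's single all-indices chunk is an accident of its equality flush check never firing and B's cursor loop does not terminate.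
-- outside the precondition, e.g. on simple_idchunker([1, 2, 3], 0): A returns [[0, 1, 2]], B does not finish within the time limit; on simple_idchunker([5], -2): A returns [[0]], B does not finish within the time limit
import Mathlib
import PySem

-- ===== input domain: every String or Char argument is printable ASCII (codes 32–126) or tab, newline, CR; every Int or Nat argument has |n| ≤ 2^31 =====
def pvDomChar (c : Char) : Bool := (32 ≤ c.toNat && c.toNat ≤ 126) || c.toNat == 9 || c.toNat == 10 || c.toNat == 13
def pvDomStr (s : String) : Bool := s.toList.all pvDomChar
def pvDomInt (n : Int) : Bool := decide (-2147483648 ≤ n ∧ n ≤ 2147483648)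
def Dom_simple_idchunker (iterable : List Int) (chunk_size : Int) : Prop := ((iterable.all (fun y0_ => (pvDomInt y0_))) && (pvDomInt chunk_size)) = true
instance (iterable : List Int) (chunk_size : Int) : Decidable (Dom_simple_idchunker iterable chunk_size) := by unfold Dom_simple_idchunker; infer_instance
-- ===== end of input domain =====

-- B replaces A's element-by-element index accumulator by a start/end cursor that emits each
-- index block arithmetically from the counted length; same cost, different decomposition.
-- Both Pythons are generators; the equivalence is about the produced sequence of chunks.

-- ===== PORT A =====
-- loop body of A's 'for _ in iterable': state = (current_index, result_indices, chunks yielded so far)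
def idchunkStep (chunk_size : Int) (st : Int × List Int × List (List Int)) (_x : Int) :
    Int × List Int × List (List Int) :=
  let res := st.2.1 ++ [st.1]
  if PySem.List.len res = chunk_size then (st.1 + 1, [], st.2.2 ++ [res])
  else (st.1 + 1, res, st.2.2)

-- A's trailing 'if len(result_indices) != 0: yield result_indices'
def idchunkFinish (s : Int × List Int × List (List Int)) : List (List Int) :=
  if PySem.List.len s.2.1 ≠ 0 then s.2.2 ++ [s.2.1] else s.2.2

def simple_idchunker (iterable : List Int) (chunk_size : Int) : List (List Int) :=
  idchunkFinish (iterable.foldl (idchunkStep chunk_size) (0, [], []))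

-- ===== PORT B =====
-- Source B's 'while start < n' cursor loop; the fuel (the counted length) only makes the loop
-- total in Lean and is never exhausted on inputs satisfying Pre_ (at most n chunks are emitted).
def idLoop (fuel : Nat) (start n cs : Int) : List (List Int) :=
  match fuel with
  | 0 => []
  | fuel + 1 =>
    if start < n then
      let e := min (start + cs) n
      PySem.List.pyRange start e 1 :: idLoop fuel e n cs
    else []

def simple_idchunker_alt (iterable : List Int) (chunk_size : Int) : List (List Int) :=
  idLoop iterable.length 0 (PySem.List.len iterable) chunk_size

-- ===== PRECONDITION & SPEC =====
-- Pre_ excludes nonpositive chunk_size with a nonempty iterable: there A's single all-indices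
-- chunk is an accident of its equality flush check never firing, and B's cursor loop does not
-- terminate (the generator never finishes).
def Pre_simple_idchunker (iterable : List Int) (chunk_size : Int) : Prop :=
  0 < chunk_size ∨ iterable = []
instance (iterable : List Int) (chunk_size : Int) : Decidable (Pre_simple_idchunker iterable chunk_size) := by unfold Pre_simple_idchunker; infer_instance

def pvWitness_simple_idchunker : List Int × Int := ([7, 8, 9], 2)

def Spec_simple_idchunker (iterable : List Int) (chunk_size : Int) (out : List (List Int)) : Prop := out = simple_idchunker_alt iterable chunk_size
instance (iterable : List Int) (chunk_size : Int) (out : List (List Int)) : Decidable (Spec_simple_idchunker iterable chunk_size out) := by unfold Spec_simple_idchunker; infer_instance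

-- ===== CLAIM (what is proved, stated in full; the proofs are below) =====
def Claim_equal_simple_idchunker : Prop := ∀ (iterable : List Int) (chunk_size : Int), Dom_simple_idchunker iterable chunk_size → Pre_simple_idchunker iterable chunk_size → Spec_simple_idchunker iterable chunk_size (simple_idchunker iterable chunk_size)

-- ===== LEMMAS AND PROOFS =====

-- The j-th full chunk for chunk size c.
def idchunkBlock (c j : Nat) : List Int :=
  PySem.List.pyRange ((c * j : Nat) : Int) ((c * j + c : Nat) : Int) 1

-- A's loop state after q full chunks plus r further elements, chunk size c.
def idchunkState (c q r : Nat) : Int × List Int × List (List Int) :=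
  (((c * q + r : Nat) : Int),
   PySem.List.pyRange ((c * q : Nat) : Int) ((c * q + r : Nat) : Int) 1,
   (List.range q).map (idchunkBlock c))

-- The chunks remaining from full-chunk index q on, for chunk size c and total length n.
def idchunkTail (c n q : Nat) : List (List Int) :=
  (List.range' q (n / c - q)).map (idchunkBlock c) ++
    (if n % c = 0 then [] else [PySem.List.pyRange ((c * (n / c) : Nat) : Int) ((n : Nat) : Int) 1])

theorem idchunk_step_flush (c : Nat) (hc : 0 < c) (q r : Nat) (hr : r + 1 = c) (x : Int) :
    idchunkStep ((c : Nat) : Int) (idchunkState c q r) x = idchunkState c (q + 1) 0 := by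
  have hmul : c * (q + 1) = c * q + c := by ring
  have hres : PySem.List.pyRange ((c * q : Nat) : Int) ((c * q + r : Nat) : Int) 1
        ++ [((c * q + r : Nat) : Int)]
      = PySem.List.pyRange ((c * q : Nat) : Int) ((c * q + r + 1 : Nat) : Int) 1 := by
    have h := (PySem.List.pyRange_one_succ_right
      (by exact_mod_cast Nat.le_add_right (c * q) r :
        ((c * q : Nat) : Int) ≤ ((c * q + r : Nat) : Int))).symm
    rw [h]
    norm_cast
  have hcond : PySem.List.len (PySem.List.pyRange ((c * q : Nat) : Int) ((c * q + r : Nat) : Int) 1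
      ++ [((c * q + r : Nat) : Int)]) = ((c : Nat) : Int) := by
    rw [hres]
    simp only [PySem.List.len_eq, PySem.List.length_pyRange_one]
    omega
  simp only [idchunkState, idchunkStep]
  rw [if_pos hcond]
  simp only [hmul, Prod.mk.injEq]
  refine ⟨?_, ?_, ?_⟩
  · exact_mod_cast (by omega : c * q + r + 1 = c * q + c + 0)
  · rw [PySem.List.pyRange_one_eq_nil (by exact_mod_cast (by omega : c * q + c + 0 ≤ c * q + c))]
  · simp only [List.range_succ, List.map_append, List.map_cons, List.map_nil]
    rw [hres]
    congr 2
    simp only [idchunkBlock]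
    congr 1
    exact_mod_cast (by omega : c * q + r + 1 = c * q + c)

theorem idchunk_step_stay (c : Nat) (hc : 0 < c) (q r : Nat) (hr : r + 1 < c) (x : Int) :
    idchunkStep ((c : Nat) : Int) (idchunkState c q r) x = idchunkState c q (r + 1) := by
  have hres : PySem.List.pyRange ((c * q : Nat) : Int) ((c * q + r : Nat) : Int) 1
        ++ [((c * q + r : Nat) : Int)]
      = PySem.List.pyRange ((c * q : Nat) : Int) ((c * q + (r + 1) : Nat) : Int) 1 := by
    have h := (PySem.List.pyRange_one_succ_right
      (by exact_mod_cast Nat.le_add_right (c * q) r :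
        ((c * q : Nat) : Int) ≤ ((c * q + r : Nat) : Int))).symm
    rw [h]
    norm_cast
  have hcond : ¬ PySem.List.len (PySem.List.pyRange ((c * q : Nat) : Int) ((c * q + r : Nat) : Int) 1
      ++ [((c * q + r : Nat) : Int)]) = ((c : Nat) : Int) := by
    rw [hres]
    simp only [PySem.List.len_eq, PySem.List.length_pyRange_one]
    omega
  simp only [idchunkState, idchunkStep]
  rw [if_neg hcond]
  simp only [Prod.mk.injEq]
  refine ⟨?_, ?_, trivial⟩
  · exact_mod_cast (by omega : c * q + r + 1 = c * q + (r + 1))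
  · exact hres

theorem idchunk_fold_pos (c : Nat) (hc : 0 < c) :
    ∀ (l : List Int) (q r : Nat), r < c →
      l.foldl (idchunkStep ((c : Nat) : Int)) (idchunkState c q r)
        = idchunkState c (q + (r + l.length) / c) ((r + l.length) % c) := by
  intro l
  induction l with
  | nil =>
      intro q r hr
      simp [Nat.div_eq_of_lt hr, Nat.mod_eq_of_lt hr]
  | cons x l ih =>
      intro q r hr
      simp only [List.foldl_cons, List.length_cons]
      by_cases hfl : r + 1 = c
      · rw [idchunk_step_flush c hc q r hfl x, ih (q + 1) 0 hc]
        simp only [Nat.zero_add]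
        rw [show r + (l.length + 1) = l.length + c by omega,
          Nat.add_div_right _ hc, Nat.add_mod_right,
          show q + (l.length / c + 1) = q + 1 + l.length / c by omega]
      · rw [idchunk_step_stay c hc q r (by omega) x, ih q (r + 1) (by omega),
          show r + (l.length + 1) = r + 1 + l.length by omega]

theorem idLoop_stop (fuel : Nat) (s n cs : Int) (h : ¬ s < n) : idLoop fuel s n cs = [] := by
  cases fuel with
  | zero => rfl
  | succ fuel => simp [idLoop, h]

theorem idLoop_eq (c : Nat) (hc : 0 < c) (n : Nat) :
    ∀ (fuel q : Nat), q ≤ n / c →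
      n / c - q + (if n % c = 0 then 0 else 1) ≤ fuel →
      idLoop fuel ((c * q : Nat) : Int) ((n : Nat) : Int) ((c : Nat) : Int) = idchunkTail c n q := by
  have hdm := Nat.div_add_mod n c
  intro fuel
  induction fuel with
  | zero =>
      intro q hq hfuel
      by_cases hmod : n % c = 0
      · rw [if_pos hmod] at hfuel
        have hq' : q = n / c := by omega
        simp [idLoop, idchunkTail, hmod, hq']
      · rw [if_neg hmod] at hfuel
        omega
  | succ fuel ih =>
      intro q hq hfuel
      by_cases hqlt : q < n / c
      · -- full chunk: c*q + c ≤ n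
        have hle : c * q + c ≤ n := by
          calc c * q + c = c * (q + 1) := by ring
            _ ≤ c * (n / c) := Nat.mul_le_mul_left c (by omega)
            _ ≤ n := by omega
        have hlt : c * q < n := by omega
        have hcond : ((c * q : Nat) : Int) < ((n : Nat) : Int) := by exact_mod_cast hlt
        have hmin : min (((c * q : Nat) : Int) + ((c : Nat) : Int)) ((n : Nat) : Int)
            = ((c * q + c : Nat) : Int) := by
          rw [show ((c * q : Nat) : Int) + ((c : Nat) : Int) = ((c * q + c : Nat) : Int) by push_cast; ring]
          exact min_eq_left (by exact_mod_cast hle)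
        have hfuel' : n / c - (q + 1) + (if n % c = 0 then 0 else 1) ≤ fuel := by
          by_cases h : n % c = 0
          · rw [if_pos h] at hfuel ⊢; omega
          · rw [if_neg h] at hfuel ⊢; omega
        have hcast : ((c * (q + 1) : Nat) : Int) = ((c * q + c : Nat) : Int) := by
          exact_mod_cast (by ring : c * (q + 1) = c * q + c)
        have ih' := ih (q + 1) (by omega) hfuel'
        rw [hcast] at ih'
        simp only [idLoop, if_pos hcond, hmin, ih', idchunkTail]
        rw [show n / c - q = (n / c - (q + 1)) + 1 by omega, List.range'_succ]
        simp [idchunkBlock]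
      · -- q = n / c: last (partial) chunk or done
        have hq' : q = n / c := by omega
        subst hq'
        by_cases hmod : n % c = 0
        · have hcn : c * (n / c) = n := by omega
          rw [show ((c * (n / c) : Nat) : Int) = ((n : Nat) : Int) from by rw [hcn],
            idLoop_stop _ _ _ _ (lt_irrefl _)]
          simp [idchunkTail, hmod]
        · have h1 : c * (n / c) < n := by omega
          have hcond : ((c * (n / c) : Nat) : Int) < ((n : Nat) : Int) := by exact_mod_cast h1
          have hblt : n % c < c := Nat.mod_lt n hc
          have h2 : n ≤ c * (n / c) + c := by omega
          have hmin : min (((c * (n / c) : Nat) : Int) + ((c : Nat) : Int)) ((n : Nat) : Int)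
              = ((n : Nat) : Int) := by
            refine min_eq_right ?_
            rw [show ((c * (n / c) : Nat) : Int) + ((c : Nat) : Int)
                = ((c * (n / c) + c : Nat) : Int) by push_cast; ring]
            exact_mod_cast h2
          simp only [idLoop, if_pos hcond, hmin]
          rw [idLoop_stop fuel _ _ _ (lt_irrefl _)]
          simp [idchunkTail, hmod]

-- A's finished state equals B's chunk list from position 0.
theorem idchunk_finish_tail (c : Nat) (n : Nat) :
    idchunkFinish (idchunkState c (n / c) (n % c)) = idchunkTail c n 0 := by
  have hdm := Nat.div_add_mod n c
  unfold idchunkFinish idchunkState idchunkTail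
  simp only [PySem.List.len_eq, PySem.List.length_pyRange_one]
  have hsub : (((c * (n / c) + n % c : Nat) : Int) - ((c * (n / c) : Nat) : Int)).toNat = n % c := by
    omega
  rw [hsub]
  have hrange : List.range' 0 (n / c - 0) = List.range (n / c) := by
    rw [Nat.sub_zero, List.range_eq_range']
  by_cases hmod : n % c = 0
  · rw [if_neg (by simp [hmod]), if_pos hmod, hrange, List.append_nil]
  · rw [if_pos (by exact_mod_cast hmod), if_neg hmod, hrange]
    have hcast : ((c * (n / c) + n % c : Nat) : Int) = ((n : Nat) : Int) := by exact_mod_cast hdm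
    rw [hcast]

-- ===== VERDICT (by name: the statement is the Claim_ definition above) =====
theorem simple_idchunker_spec : Claim_equal_simple_idchunker := by
  intro iterable cs _hdom hpre
  unfold Spec_simple_idchunker simple_idchunker simple_idchunker_alt
  rw [show (PySem.List.len iterable) = ((iterable.length : Nat) : Int) from PySem.List.len_eq iterable]
  rcases hpre with hcs | hnil
  · -- 0 < chunk_size
    set n : Nat := iterable.length with hn
    set c : Nat := cs.toNat with hcdef
    have hcs_eq : cs = ((c : Nat) : Int) := by omega
    have hc : 0 < c := by omega
    have hinit : ((0 : Int), ([] : List Int), ([] : List (List Int))) = idchunkState c 0 0 := by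
      simp [idchunkState, PySem.List.pyRange_one_eq_nil]
    rw [hcs_eq, hinit, idchunk_fold_pos c hc iterable 0 0 hc]
    simp only [Nat.zero_add, ← hn]
    rw [idchunk_finish_tail c n]
    have hfuel : n / c - 0 + (if n % c = 0 then 0 else 1) ≤ n := by
      by_cases hmod : n % c = 0
      · simpa [hmod] using Nat.div_le_self n c
      · have hc1 : c ≠ 1 := fun h => hmod (by rw [h]; exact Nat.mod_one n)
        have hn1 : 0 < n := by
          rcases Nat.eq_zero_or_pos n with h | h
          · exact absurd (by simp [h]) hmod
          · exact h
        have := Nat.div_lt_self hn1 (by omega : 1 < c)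
        simp [hmod]; omega
    have h0 : ((0 : Int)) = ((c * 0 : Nat) : Int) := by simp
    rw [h0, idLoop_eq c hc n n 0 (Nat.zero_le _) hfuel]
  · -- iterable = []
    subst hnil
    simp [idchunkFinish, idLoop]
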